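-- pv_equiv track=rewrite | github.com/abdulhathi/DSA_In_All_Langs | DSA_In_Python/02_Geometry/01_Print_Lower_Triangle_of_N.py | printLowerTriangle
-- ===== SOURCE A (Python) =====
-- def printLowerTriangle(n):
--     res = []
--     for i in range(n):
--         row = []
--         for j in range(i+1):
--             row.append("#" if (j+1) % 2 == 0 else "*")
--         res.append(row)
--     return res
-- ===== SOURCE B (Python) =====
-- def printLowerTriangle(n):
--     pattern = ["*" if k % 2 == 0 else "#" for k in range(n)]
--     return [pattern[:i + 1] for i in range(n)]
-- ===== Notes on version B (the rewrite author's own statement) =====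
-- stated objective: simpler
-- what changed: B computes the alternating pattern once and derives each row as a prefix slice of it, replacing A's nested inner loop that rebuilds the alternation per row.
import Mathlib
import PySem

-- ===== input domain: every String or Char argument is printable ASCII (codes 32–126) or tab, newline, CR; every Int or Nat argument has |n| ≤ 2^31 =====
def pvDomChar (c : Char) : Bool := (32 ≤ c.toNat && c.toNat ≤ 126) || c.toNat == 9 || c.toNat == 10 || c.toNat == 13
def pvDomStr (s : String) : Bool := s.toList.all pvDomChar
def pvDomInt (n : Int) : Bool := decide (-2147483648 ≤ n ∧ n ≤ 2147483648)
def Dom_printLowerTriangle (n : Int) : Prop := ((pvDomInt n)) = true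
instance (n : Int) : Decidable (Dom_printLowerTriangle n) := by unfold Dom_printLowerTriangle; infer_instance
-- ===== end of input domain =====

-- B builds the alternating pattern once and takes prefix slices per row, instead of A's nested per-row loop (objective: simpler).


-- ===== PORT A =====
def printLowerTriangle (n : Int) : List (List String) :=
  (PySem.List.pyRange 0 n 1).foldl
    (fun res i =>
      res ++ [(PySem.List.pyRange 0 (i + 1) 1).foldl
        (fun row j => row ++ [if (j + 1) % 2 == 0 then "#" else "*"]) []])
    []

-- ===== PORT B =====
def printLowerTriangle_alt (n : Int) : List (List String) :=
  let pattern := (PySem.List.pyRange 0 n 1).map (fun k => if k % 2 == 0 then "*" else "#")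
  (PySem.List.pyRange 0 n 1).map (fun i => PySem.List.slice pattern none (some (i + 1)))

-- ===== PRECONDITION & SPEC =====
def Spec_printLowerTriangle (n : Int) (out : List (List String)) : Prop := out = printLowerTriangle_alt n
instance (n : Int) (out : List (List String)) : Decidable (Spec_printLowerTriangle n out) := by unfold Spec_printLowerTriangle; infer_instance

-- ===== CLAIM (what is proved, stated in full; the proofs are below) =====
def Claim_equal_printLowerTriangle : Prop := ∀ (n : Int), Dom_printLowerTriangle n → Spec_printLowerTriangle n (printLowerTriangle n)

-- ===== LEMMAS AND PROOFS =====

-- A's inner-loop cell at index j equals B's pattern cell at index j.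
theorem pvCell_eq (j : Int) :
    (if (j + 1) % 2 == 0 then "#" else "*") = (if j % 2 == 0 then "*" else "#") := by
  rcases Int.emod_two_eq j with h | h <;> simp [h] <;> omega

-- ===== VERDICT (by name: the statement is the Claim_ definition above) =====
theorem printLowerTriangle_spec : Claim_equal_printLowerTriangle := by
  intro n _
  unfold Spec_printLowerTriangle printLowerTriangle printLowerTriangle_alt
  rw [PySem.List.foldl_append_singleton_eq_map]
  simp only [List.nil_append]
  apply List.map_congr_left
  intro i hi
  rw [PySem.List.foldl_append_singleton_eq_map, List.nil_append]
  have hmem := (PySem.List.mem_pyRange_one).1 hi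
  rw [PySem.List.slice_to _ (by omega : (0:Int) ≤ i + 1)]
  rw [PySem.List.pyRange_one_append 0 (i + 1) n (by omega) (by omega), List.map_append,
    List.take_append_of_le_length, List.take_of_length_le]
  · exact List.map_congr_left (fun j _ => pvCell_eq j)
  · simp [PySem.List.length_pyRange_one]
  · simp [PySem.List.length_pyRange_one]
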